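-- pv_equiv track=rewrite | github.com/oskros/Project_euler | helper.py | pentag_range_below
-- ===== SOURCE A (Python) =====
-- def polygonal(degree, n):
--     if degree == 3:
--         return n*(n+1)//2
--     elif degree == 4:
--         return n*n
--     elif degree == 5:
--         return n*(3*n-1)//2
--     elif degree == 6:
--         return n*(2*n-1)
--     elif degree == 7:
--         return n*(5*n-3)//2
--     elif degree == 8:
--         return n*(3*n-2)
--     else:
--         raise NotImplementedError
--
-- def pentag_range_below(n):
--     start = 1
--     out = []
--     next_2 = [1, 2]
--     while next_2[0] <= n:
--         if next_2[-1] <= n: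
--             out.extend(next_2)
--         else:
--             out.append(next_2[0])
--         start += 1
--         next_2 = [polygonal(5, y*start) for y in [1, -1]]
--     return out
-- ===== SOURCE B (Python) =====
-- def pentag_range_below(n):
--     # Build the positive-k and negative-k pentagonal runs separately, then interleave them.
--     pos = []
--     k = 1
--     while k * (3 * k - 1) // 2 <= n:
--         pos.append(k * (3 * k - 1) // 2)
--         k += 1
--     neg = []
--     k = 1
--     while k * (3 * k + 1) // 2 <= n:
--         neg.append(k * (3 * k + 1) // 2)
--         k += 1
--     out = []
--     i = 0
--     while i < len(pos) or i < len(neg):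
--         if i < len(pos):
--             out.append(pos[i])
--         if i < len(neg):
--             out.append(neg[i])
--         i += 1
--     return out
-- ===== Notes on version B (the rewrite author's own statement) =====
-- stated objective: alternative
-- what changed: A runs one while-loop carrying a two-element list [p(k), p(-k)] with a conditional extend/append; B generates the positive-k and negative-k pentagonal runs in two independent loops and interleaves them in a third pass.
import Mathlib
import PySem

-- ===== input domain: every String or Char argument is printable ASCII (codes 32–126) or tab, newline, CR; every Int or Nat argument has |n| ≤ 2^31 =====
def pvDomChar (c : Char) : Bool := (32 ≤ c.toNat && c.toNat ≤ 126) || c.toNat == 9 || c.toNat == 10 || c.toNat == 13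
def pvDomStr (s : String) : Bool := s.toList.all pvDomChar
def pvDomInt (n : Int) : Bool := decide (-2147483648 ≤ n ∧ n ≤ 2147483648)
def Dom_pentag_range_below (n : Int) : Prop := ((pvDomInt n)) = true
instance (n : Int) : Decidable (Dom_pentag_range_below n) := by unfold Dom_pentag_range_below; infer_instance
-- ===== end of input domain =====

-- B builds the positive-k and negative-k pentagonal runs in two separate loops and
-- interleaves them, instead of A's single loop over two-element lists (alternative decomposition).

-- ===== PORT A =====
-- helper polygonal(degree, n); the NotImplementedError branch is unreachable here
-- (pentag_range_below only calls degree = 5), ported as a junk value 0.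
def pvPolygonal (degree : Int) (n : Int) : Int :=
  if degree = 3 then PySem.Int.floordiv (n * (n + 1)) 2
  else if degree = 4 then n * n
  else if degree = 5 then PySem.Int.floordiv (n * (3 * n - 1)) 2
  else if degree = 6 then n * (2 * n - 1)
  else if degree = 7 then PySem.Int.floordiv (n * (5 * n - 3)) 2
  else if degree = 8 then n * (3 * n - 2)
  else 0

-- the while-loop of A; the two-element list next_2 is carried as a pair; fuel only
-- makes the recursion total (never reached: same fuel threads through both ports' loops)
def pentagALoop : Nat → Int → Int → Int × Int → List Int
  | 0, _, _, _ => []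
  | fuel + 1, n, start, (a, b) =>
    if a ≤ n then
      (if b ≤ n then [a, b] else [a]) ++
        pentagALoop fuel n (start + 1)
          (pvPolygonal 5 (1 * (start + 1)), pvPolygonal 5 ((-1) * (start + 1)))
    else []

def pentag_range_below (n : Int) : List Int :=
  pentagALoop (n.toNat + 2) n 1 (pvPolygonal 5 (1 * 1), pvPolygonal 5 ((-1) * 1))

-- ===== PORT B =====
def pvPosRun : Nat → Int → Int → List Int
  | 0, _, _ => []
  | fuel + 1, n, k =>
    if PySem.Int.floordiv (k * (3 * k - 1)) 2 ≤ n then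
      PySem.Int.floordiv (k * (3 * k - 1)) 2 :: pvPosRun fuel n (k + 1)
    else []

def pvNegRun : Nat → Int → Int → List Int
  | 0, _, _ => []
  | fuel + 1, n, k =>
    if PySem.Int.floordiv (k * (3 * k + 1)) 2 ≤ n then
      PySem.Int.floordiv (k * (3 * k + 1)) 2 :: pvNegRun fuel n (k + 1)
    else []

-- the index-interleaving loop of B, as the obvious simultaneous recursion
def pvWeave : List Int → List Int → List Int
  | [], [] => []
  | [], q :: qs => q :: pvWeave [] qs
  | p :: ps, [] => p :: pvWeave ps []
  | p :: ps, q :: qs => p :: q :: pvWeave ps qs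

def pentag_range_below_alt (n : Int) : List Int :=
  pvWeave (pvPosRun (n.toNat + 2) n 1) (pvNegRun (n.toNat + 2) n 1)

-- ===== PRECONDITION & SPEC =====
def Spec_pentag_range_below (n : Int) (out : List Int) : Prop := out = pentag_range_below_alt n
instance (n : Int) (out : List Int) : Decidable (Spec_pentag_range_below n out) := by unfold Spec_pentag_range_below; infer_instance

-- ===== CLAIM (what is proved, stated in full; the proofs are below) =====
def Claim_equal_pentag_range_below : Prop := ∀ (n : Int), Dom_pentag_range_below n → Spec_pentag_range_below n (pentag_range_below n)

-- ===== LEMMAS AND PROOFS =====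

-- closed form of polygonal 5: k*(3k-1) is even, so the floor division is exact
theorem pvPent_eq (k : Int) : 2 * pvPolygonal 5 k = k * (3 * k - 1) := by
  have h : (2 : Int) ∣ k * (3 * k - 1) := by
    rcases Int.even_or_odd k with ⟨t, ht⟩ | ⟨t, ht⟩
    · exact ⟨t * (3 * k - 1), by rw [ht]; ring⟩
    · exact ⟨k * (3 * t + 1), by rw [ht]; ring⟩
  obtain ⟨t, ht⟩ := h
  simp only [pvPolygonal]
  norm_num [ht, PySem.Int.floordiv_eq_ediv_of_pos (show (0:Int) < 2 by norm_num)]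

theorem pentagALoop_nil (fuel : Nat) (n s a b : Int) (h : ¬ a ≤ n) :
    pentagALoop fuel n s (a, b) = [] := by
  cases fuel <;> simp [pentagALoop, h]

theorem pvPosRun_nil (fuel : Nat) (n k : Int)
    (h : ¬ PySem.Int.floordiv (k * (3 * k - 1)) 2 ≤ n) : pvPosRun fuel n k = [] := by
  cases fuel <;> simp only [pvPosRun, if_neg h]

theorem pvLoop_eq (fuel : Nat) (n : Int) : ∀ s : Int, 1 ≤ s →
    pentagALoop fuel n s (pvPolygonal 5 (1 * s), pvPolygonal 5 ((-1) * s))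
      = pvWeave (pvPosRun fuel n s) (pvNegRun fuel n s) := by
  induction fuel with
  | zero => intro s _; simp [pentagALoop, pvPosRun, pvNegRun, pvWeave]
  | succ fuel ih =>
    intro s hs
    have hp : pvPolygonal 5 (1 * s) = PySem.Int.floordiv (s * (3 * s - 1)) 2 := by
      simp [pvPolygonal]
    have hq : pvPolygonal 5 ((-1) * s) = PySem.Int.floordiv (s * (3 * s + 1)) 2 := by
      simp only [pvPolygonal]; norm_num; ring_nf
    -- numeric facts via the exact closed form
    have e1 := pvPent_eq (1 * s)
    have e2 := pvPent_eq ((-1) * s)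
    have e3 := pvPent_eq (1 * (s + 1))
    have hpq : pvPolygonal 5 (1 * s) ≤ pvPolygonal 5 ((-1) * s) := by nlinarith
    have hqn : pvPolygonal 5 ((-1) * s) < pvPolygonal 5 (1 * (s + 1)) := by nlinarith
    by_cases h1 : pvPolygonal 5 (1 * s) ≤ n
    · by_cases h2 : pvPolygonal 5 ((-1) * s) ≤ n
      · -- both appended; recurse on everything
        have := ih (s + 1) (by omega)
        simp only [pentagALoop, h1, h2, if_pos]
        rw [this]
        have hps : pvPosRun (fuel + 1) n s
            = pvPolygonal 5 (1 * s) :: pvPosRun fuel n (s + 1) := by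
          simp only [pvPosRun, ← hp, h1, if_pos]
        have hns : pvNegRun (fuel + 1) n s
            = pvPolygonal 5 ((-1) * s) :: pvNegRun fuel n (s + 1) := by
          simp only [pvNegRun, ← hq, h2, if_pos]
        rw [hps, hns]; simp [pvWeave]
      · -- only the first element fits; all remaining runs are empty
        have hrec : pentagALoop fuel n (s + 1)
            (pvPolygonal 5 (1 * (s + 1)), pvPolygonal 5 ((-1) * (s + 1))) = [] :=
          pentagALoop_nil _ _ _ _ _ (by omega)
        have hposrec : pvPosRun fuel n (s + 1) = [] := by
          apply pvPosRun_nil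
          rw [show PySem.Int.floordiv ((s+1) * (3 * (s+1) - 1)) 2 = pvPolygonal 5 (1*(s+1)) by
            simp [pvPolygonal]]
          omega
        have hps : pvPosRun (fuel + 1) n s
            = pvPolygonal 5 (1 * s) :: pvPosRun fuel n (s + 1) := by
          simp only [pvPosRun, ← hp, h1, if_pos]
        have hns : pvNegRun (fuel + 1) n s = [] := by
          simp only [pvNegRun, ← hq, if_neg h2]
        simp only [pentagALoop, if_pos h1, if_neg h2, hrec]
        rw [hps, hns, hposrec]; simp [pvWeave]
    · -- loop does not start
      have hps : pvPosRun (fuel + 1) n s = [] := by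
        simp only [pvPosRun, ← hp]; rw [if_neg h1]
      have hns : pvNegRun (fuel + 1) n s = [] := by
        simp only [pvNegRun, ← hq]; rw [if_neg (by omega)]
      simp only [pentagALoop, h1, if_neg, not_false_iff]
      rw [hps, hns]; simp [pvWeave]

-- ===== VERDICT (by name: the statement is the Claim_ definition above) =====
theorem pentag_range_below_spec : Claim_equal_pentag_range_below := by
  intro n _
  unfold Spec_pentag_range_below pentag_range_below pentag_range_below_alt
  exact pvLoop_eq (n.toNat + 2) n 1 le_rfl
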